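-- pv_equiv track=rewrite | github.com/SMITHABHASKAR/EID_ECEN5783_Fall19 | SuperProject/TCP/minimalLoomConnection.py | tabby
-- ===== SOURCE A (Python) =====
-- def tabby(threads, rowNumber):
--   pattern = []
--   for i in range(0, threads):
--     thread = 1;
--     if (i%2 == rowNumber%2):
--       thread = 0
--
--     pattern.append(thread)
--
--   return pattern
-- ===== SOURCE B (Python) =====
-- def tabby(threads, rowNumber):
--     block = [0, 1] if rowNumber % 2 == 0 else [1, 0]
--     return (block * ((threads + 1) // 2))[:threads]
-- ===== Notes on version B (the rewrite author's own statement) =====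
-- stated objective: idiomatic
-- what changed: Replaces the per-index loop with its per-element modulo test by picking a two-element base block from rowNumber's parity and tiling it via list replication plus truncation (the loop moves into C-level list repetition).
import Mathlib
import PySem

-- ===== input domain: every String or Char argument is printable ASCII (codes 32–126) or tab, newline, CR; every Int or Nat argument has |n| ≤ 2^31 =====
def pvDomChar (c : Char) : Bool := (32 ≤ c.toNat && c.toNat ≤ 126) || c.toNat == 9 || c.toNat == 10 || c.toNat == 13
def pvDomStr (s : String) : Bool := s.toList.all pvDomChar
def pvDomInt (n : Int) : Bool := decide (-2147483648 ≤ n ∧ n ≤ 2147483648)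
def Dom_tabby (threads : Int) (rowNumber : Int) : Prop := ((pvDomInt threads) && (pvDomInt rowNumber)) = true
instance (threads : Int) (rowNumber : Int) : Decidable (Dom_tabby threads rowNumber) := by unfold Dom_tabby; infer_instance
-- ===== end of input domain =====

-- B builds the row by tiling a parity-chosen two-element block and truncating, instead of A's per-index loop with a modulo test per element (idiomatic; same O(n) cost).

-- ===== PORT A =====
def tabby (threads : Int) (rowNumber : Int) : List Int :=
  (PySem.List.pyRange 0 threads 1).foldl
    (fun pattern i =>
      let thread : Int := 1
      let thread := if PySem.Int.mod i 2 == PySem.Int.mod rowNumber 2 then 0 else thread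
      pattern ++ [thread])
    []

-- ===== PORT B =====
def tabby_alt (threads : Int) (rowNumber : Int) : List Int :=
  PySem.List.slice
    (PySem.List.pyRepeat (if PySem.Int.mod rowNumber 2 == 0 then [0, 1] else [1, 0])
      (PySem.Int.floordiv (threads + 1) 2))
    none (some threads)

-- ===== PRECONDITION & SPEC =====
def Spec_tabby (threads : Int) (rowNumber : Int) (out : List Int) : Prop := out = tabby_alt threads rowNumber
instance (threads : Int) (rowNumber : Int) (out : List Int) : Decidable (Spec_tabby threads rowNumber out) := by unfold Spec_tabby; infer_instance

-- ===== CLAIM (what is proved, stated in full; the proofs are below) =====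
def Claim_equal_tabby : Prop := ∀ (threads : Int) (rowNumber : Int), Dom_tabby threads rowNumber → Spec_tabby threads rowNumber (tabby threads rowNumber)

-- ===== LEMMAS AND PROOFS =====

-- flattening m copies of a two-element block is the alternating map over range (2*m)
lemma flatten_replicate_pair (a b : Int) (m : Nat) :
    (List.replicate m ([a, b] : List Int)).flatten
      = (List.range (2 * m)).map (fun k => if k % 2 = 0 then a else b) := by
  induction m with
  | zero => simp
  | succ m ih =>
    have h2 : 2 * (m + 1) = (2 * m + 1) + 1 := by omega
    rw [List.replicate_succ', List.flatten_append, ih, h2, List.range_succ, List.range_succ]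
    have e0 : (2 * m) % 2 = 0 := by omega
    have e1 : (2 * m + 1) % 2 = 1 := by omega
    simp [e0, e1]

lemma mod_two_natCast (k : Nat) : PySem.Int.mod (k : Int) 2 = ((k % 2 : Nat) : Int) := by
  rw [PySem.Int.mod_eq_emod_of_pos (by norm_num)]
  omega

-- ===== VERDICT (by name: the statement is the Claim_ definition above) =====
theorem tabby_spec : Claim_equal_tabby := by
  intro threads rowNumber _
  unfold Spec_tabby tabby tabby_alt
  rw [PySem.List.foldl_append_singleton_eq_map, PySem.List.pyRange_one, List.map_map,
      List.nil_append]
  rcases (by omega : threads ≤ 0 ∨ 0 < threads) with hle | hpos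
  · -- threads ≤ 0 : both sides are []
    have hm : ((threads + 1) / 2).toNat = 0 := by omega
    have hn : (threads - 0).toNat = 0 := by omega
    have hrep : PySem.List.pyRepeat
        (if PySem.Int.mod rowNumber 2 == 0 then ([0, 1] : List Int) else [1, 0])
        (PySem.Int.floordiv (threads + 1) 2) = ([] : List Int) := by
      rw [PySem.Int.floordiv_eq_ediv_of_pos (by norm_num)]
      simp [PySem.List.pyRepeat, hm]
    rw [hn, hrep]
    simp [PySem.List.slice]
  · -- threads > 0
    have hth : threads = ((threads.toNat : Nat) : Int) := by omega
    set n := threads.toNat with hndef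
    have hfd : PySem.Int.floordiv (threads + 1) 2 = (((n + 1) / 2 : Nat) : Int) := by
      rw [hth]
      exact_mod_cast PySem.Int.floordiv_natCast (n + 1) 2
    set m := (n + 1) / 2 with hmdef
    have hnm : n ≤ 2 * m := by omega
    have hsub : (threads - 0).toNat = n := by omega
    rw [hsub, hfd]
    have hslice : ∀ xs : List Int, PySem.List.slice xs none (some threads) = xs.take n := by
      intro xs
      rw [PySem.List.slice_to xs (by omega)]
    rcases PySem.Int.mod_two_eq rowNumber with hr | hr
    · have hblock : (if PySem.Int.mod rowNumber 2 == 0 then ([0, 1] : List Int) else [1, 0])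
          = [0, 1] := by rw [hr]; rfl
      rw [hblock, hr]
      simp only [PySem.List.pyRepeat, Int.toNat_natCast, hslice, flatten_replicate_pair,
        ← List.map_take, List.take_range, Nat.min_eq_left hnm]
      refine List.map_congr_left ?_
      intro k hk
      simp only [Function.comp, zero_add, mod_two_natCast, beq_iff_eq]
      rcases Nat.mod_two_eq_zero_or_one k with hk2 | hk2 <;> simp [hk2]
    · have hblock : (if PySem.Int.mod rowNumber 2 == 0 then ([0, 1] : List Int) else [1, 0])
          = [1, 0] := by rw [hr]; rfl
      rw [hblock, hr]
      simp only [PySem.List.pyRepeat, Int.toNat_natCast, hslice, flatten_replicate_pair,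
        ← List.map_take, List.take_range, Nat.min_eq_left hnm]
      refine List.map_congr_left ?_
      intro k hk
      simp only [Function.comp, zero_add, mod_two_natCast, beq_iff_eq]
      rcases Nat.mod_two_eq_zero_or_one k with hk2 | hk2 <;> simp [hk2]
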